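-- pv_equiv track=rewrite | github.com/StoianBodurov/Python-101-Forever | C01/C01P17.py | right_diagonals_match
-- ===== SOURCE A (Python) =====
-- def count_matches(s, w):
--     if w == w[:: -1]:
--         return s.count(w)
--
--     return s.count(w) + s[:: -1].count(w)
--
-- def right_diagonals_match(m, w):
--     count = 0
--
--     for c in range(len(m[0]) - 1, -1, -1):
--         new_word = ''
--         row = 0
--         column = c
--         while row < len(m) and column >= 0:
--             new_word += m[row][column]
--             row += 1
--             column -= 1
--         count += count_matches(new_word, w)
--
--     for r in range(1, len(m)):
--         new_word = ''
--         row = r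
--         column = len(m[r]) - 1
--         while row < len(m) and column >= 0:
--             new_word += m[row][column]
--             row += 1
--             column -= 1
--         count += count_matches(new_word, w)
--
--     return count
-- ===== SOURCE B (Python) =====
-- def count_matches(s, w):
--     if w == w[:: -1]:
--         return s.count(w)
--
--     return s.count(w) + s[:: -1].count(w)
--
-- def right_diagonals_match(m, w):
--     # One bucketing pass over the cells: anti-diagonal key r + c indexes a
--     # preallocated accumulator array; then sum the per-diagonal counts.
--     strings = [''] * (len(m) + len(m[0]) - 1)
--     for r, row in enumerate(m):
--         for c, ch in enumerate(row):
--             strings[r + c] += ch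
--     total = 0
--     for s in strings:
--         total += count_matches(s, w)
--     return total
-- ===== Notes on version B (the rewrite author's own statement) =====
-- stated objective: alternative
-- what changed: A's two directed diagonal walks with mutable row/column cursors are replaced by a single row-major bucketing pass that appends each cell m[r][c] to a preallocated accumulator array indexed by the anti-diagonal key r + c, followed by one summing pass over the buckets.
-- outside the precondition, e.g. on right_diagonals_match(['ab', 'a'], 'a'): A returns 3, B returns 2
import Mathlib
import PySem

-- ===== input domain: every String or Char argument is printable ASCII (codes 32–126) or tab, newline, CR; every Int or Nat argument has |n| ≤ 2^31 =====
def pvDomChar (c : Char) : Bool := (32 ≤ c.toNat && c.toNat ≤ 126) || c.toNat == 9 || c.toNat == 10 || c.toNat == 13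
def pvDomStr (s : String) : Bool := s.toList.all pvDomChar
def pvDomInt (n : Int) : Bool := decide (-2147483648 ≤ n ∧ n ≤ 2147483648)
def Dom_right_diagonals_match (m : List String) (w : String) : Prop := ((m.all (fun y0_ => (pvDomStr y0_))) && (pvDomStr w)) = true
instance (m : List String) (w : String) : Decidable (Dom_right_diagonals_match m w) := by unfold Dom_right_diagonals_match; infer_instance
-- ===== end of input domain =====

-- B replaces A's two directed diagonal walks (mutable row/column cursors) by one row-major
-- bucketing pass into a preallocated per-anti-diagonal accumulator array indexed by r + c
-- (objective: alternative decomposition, same cost).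


-- ===== PORT A =====
-- count_matches(s, w): helper shared verbatim by both Pythons; w[::-1]/s[::-1] is reversal,
-- s.count(w) is PySem.Chars.count.
def count_matches (s w : List Char) : Int :=
  if w = w.reverse then (PySem.Chars.count s w : Int)
  else (PySem.Chars.count s w : Int) + (PySem.Chars.count s.reverse w : Int)

-- the 'while row < len(m) and column >= 0: new_word += m[row][column]; row += 1; column -= 1' loop;
-- indexing is total via pyGetD, exact on the in-range indices Pre_ guarantees.
def walkA (g : List (List Char)) (row col : Int) (acc : List Char) : List Char :=
  if _h : row < PySem.List.len g ∧ 0 ≤ col then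
    walkA g (row + 1) (col - 1)
      (acc ++ [PySem.List.pyGetD (PySem.List.pyGetD g row []) col ' '])
  else acc
termination_by (PySem.List.len g - row).toNat
decreasing_by simp [PySem.List.len] at *; omega

def right_diagonals_match (m : List String) (w : String) : Int :=
  let g := m.map String.toList
  let count1 :=
    (PySem.List.pyRange (PySem.List.len (PySem.List.pyGetD g 0 []) - 1) (-1) (-1)).foldl
      (fun count c => count + count_matches (walkA g 0 c []) w.toList) 0
  (PySem.List.pyRange 1 (PySem.List.len g) 1).foldl
    (fun count r =>
      count + count_matches (walkA g r (PySem.List.len (PySem.List.pyGetD g r []) - 1) []) w.toList)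
    count1

-- ===== PORT B =====
-- strings = [''] * (len(m) + len(m[0]) - 1); strings[r + c] += ch per cell in row-major order;
-- then sum count_matches over the buckets.  strings[r+c] read/write is pyGetD/pySetD, exact on
-- the in-range indices Pre_ guarantees (r + c ≥ 0 always).
def right_diagonals_match_alt (m : List String) (w : String) : Int :=
  let g := m.map String.toList
  let strings : List (List Char) :=
    PySem.List.pyRepeat [([] : List Char)]
      (PySem.List.len g + PySem.List.len (PySem.List.pyGetD g 0 []) - 1)
  let strings :=
    (PySem.List.enumerate g).foldl (fun acc rr =>
      (PySem.List.enumerate rr.2).foldl (fun acc cc =>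
        PySem.List.pySetD acc (rr.1 + cc.1)
          (PySem.List.pyGetD acc (rr.1 + cc.1) [] ++ [cc.2])) acc) strings
  strings.foldl (fun total s => total + count_matches s w.toList) 0

-- ===== PRECONDITION & SPEC =====
-- Pre_ admits non-empty rectangular matrices, plus the degenerate single-column matrices with
-- missing entries (every row at most one character, and a one-character first row or an empty
-- last row).  It excludes [] (A raises IndexError on m[0]) and the remaining jagged inputs:
-- there which cells form which anti-diagonal is unspecified — A's start-cell walks and B's r+c
-- bucketing are both defensible groupings (and B's bucket index can go out of range).
def Pre_right_diagonals_match (m : List String) (w : String) : Prop :=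
  m ≠ [] ∧
    ((∀ s ∈ m, s.toList.length = (m.headD "").toList.length) ∨
     ((∀ s ∈ m, s.toList.length ≤ 1) ∧
      ((m.headD "").toList.length = 1 ∨ (m.getLastD "").toList.length = 0)))
instance (m : List String) (w : String) : Decidable (Pre_right_diagonals_match m w) := by
  unfold Pre_right_diagonals_match; infer_instance

def pvWitness_right_diagonals_match : List String × String := (["ab", "ba"], "a")

def Spec_right_diagonals_match (m : List String) (w : String) (out : Int) : Prop :=
  out = right_diagonals_match_alt m w
instance (m : List String) (w : String) (out : Int) : Decidable (Spec_right_diagonals_match m w out) := by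
  unfold Spec_right_diagonals_match; infer_instance

-- ===== CLAIM (what is proved, stated in full; the proofs are below) =====
def Claim_equal_right_diagonals_match : Prop :=
  ∀ (m : List String) (w : String), Dom_right_diagonals_match m w →
    Pre_right_diagonals_match m w →
    Spec_right_diagonals_match m w (right_diagonals_match m w)

-- ===== LEMMAS AND PROOFS =====

-- the characters of anti-diagonal k of g (rows of length C), top to bottom
def bucketD (g : List (List Char)) (C k : Nat) : List Char :=
  (List.range g.length).flatMap (fun r =>
    if r ≤ k ∧ k < r + C then
      [PySem.List.pyGetD (g.getD r []) ((k : Int) - (r : Int)) ' ']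
    else [])

-- one bucketing step of B
def stepB (acc : List (List Char)) (p : Int × Char) : List (List Char) :=
  PySem.List.pySetD acc p.1 (PySem.List.pyGetD acc p.1 [] ++ [p.2])

-- closed form of A's while-walk
theorem walkA_closed (g : List (List Char)) (row col : Int) (acc : List Char) :
    walkA g row col acc = acc ++
      (List.range (min ((g.length : Int) - row).toNat ((col + 1)).toNat)).map
        (fun (j : Nat) => PySem.List.pyGetD (PySem.List.pyGetD g (row + (j : Int)) []) (col - (j : Int)) ' ') := by
  induction row, col, acc using walkA.induct g with
  | case1 row col acc h ih =>
    rw [walkA, dif_pos h, ih]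
    simp only [PySem.List.len_eq] at h
    have hmin : min ((g.length : Int) - row).toNat ((col + 1)).toNat
        = (min ((g.length : Int) - (row + 1)).toNat ((col - 1 + 1)).toNat) + 1 := by omega
    rw [hmin, List.range_succ_eq_map]
    simp only [List.map_cons, List.map_map, List.append_assoc, List.singleton_append]
    apply congrArg
    apply List.cons_eq_cons.mpr
    constructor
    · norm_num
    · apply List.map_congr_left
      intro j _
      simp only [Function.comp_apply]
      have e1 : row + 1 + (j : Int) = row + ((j + 1 : Nat) : Int) := by push_cast; ring
      have e2 : col - 1 - (j : Int) = col - ((j + 1 : Nat) : Int) := by push_cast; ring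
      rw [e1, e2]
  | case2 row col acc h =>
    rw [walkA, dif_neg h]
    simp only [PySem.List.len_eq, not_and] at h
    have : min ((g.length : Int) - row).toNat ((col + 1)).toNat = 0 := by
      rcases lt_or_ge row (g.length : Int) with hr | hr
      · have hc := h hr; omega
      · omega
    simp [this]

theorem flatMap_range_if {α : Type} (R lo hi : Nat) (f : Nat → α) :
    (List.range R).flatMap (fun r => if lo ≤ r ∧ r < hi then [f r] else [])
      = (List.range (min hi R - lo)).map (fun j => f (lo + j)) := by
  induction R with
  | zero => simp
  | succ R ih =>
    rw [List.range_succ, List.flatMap_append, ih]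
    by_cases h : lo ≤ R ∧ R < hi
    · have h1 : min hi (R + 1) - lo = (min hi R - lo) + 1 := by omega
      rw [h1, List.range_succ, List.map_append]
      simp only [List.flatMap_cons, List.flatMap_nil, List.append_nil, if_pos h,
        List.map_cons, List.map_nil]
      have he : lo + (min hi R - lo) = R := by omega
      rw [he]
    · have h1 : min hi (R + 1) - lo = min hi R - lo := by omega
      rw [h1]
      simp only [List.flatMap_cons, List.flatMap_nil, List.append_nil, if_neg h]

theorem bucketD_eq_walk_first (g : List (List Char)) (C k : Nat)
    (hk : k < C) :
    bucketD g C k = walkA g 0 (k : Int) [] := by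
  rw [walkA_closed, List.nil_append]
  unfold bucketD
  have hf : (fun r => if r ≤ k ∧ k < r + C then
        [PySem.List.pyGetD (g.getD r []) ((k : Int) - (r : Int)) ' '] else [])
      = (fun r => if k + 1 - C ≤ r ∧ r < k + 1 then
        [PySem.List.pyGetD (g.getD r []) ((k : Int) - (r : Int)) ' '] else []) := by
    funext r; exact if_congr (by omega) rfl rfl
  rw [hf, flatMap_range_if]
  have h1 : min (k + 1) g.length - (k + 1 - C)
      = min ((g.length : Int) - 0).toNat (((k : Int) + 1)).toNat := by omega
  rw [h1]
  apply List.map_congr_left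
  intro j _
  have h2 : k + 1 - C + j = j := by omega
  rw [h2]
  simp only [zero_add, PySem.List.pyGetD_natCast]

theorem bucketD_eq_walk_second (g : List (List Char)) (C r0 : Nat)
    (hr : 0 < r0) :
    bucketD g C (r0 + C - 1) = walkA g (r0 : Int) ((C : Int) - 1) [] := by
  rw [walkA_closed, List.nil_append]
  unfold bucketD
  have hf : (fun r => if r ≤ r0 + C - 1 ∧ r0 + C - 1 < r + C then
        [PySem.List.pyGetD (g.getD r []) (((r0 + C - 1 : Nat) : Int) - (r : Int)) ' '] else [])
      = (fun r => if r0 ≤ r ∧ r < r0 + C then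
        [PySem.List.pyGetD (g.getD r []) (((r0 + C - 1 : Nat) : Int) - (r : Int)) ' '] else []) := by
    funext r; exact if_congr (by omega) rfl rfl
  rw [hf, flatMap_range_if]
  have h1 : min (r0 + C) g.length - r0
      = min ((g.length : Int) - (r0 : Int)).toNat (((C : Int) - 1 + 1)).toNat := by omega
  rw [h1]
  apply List.map_congr_left
  intro j _
  have e1 : ((r0 + C - 1 : Nat) : Int) - ((r0 + j : Nat) : Int) = (C : Int) - 1 - (j : Int) := by
    omega
  have e2 : (r0 : Int) + (j : Int) = ((r0 + j : Nat) : Int) := by push_cast; ring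
  rw [e1, e2, PySem.List.pyGetD_natCast]

theorem enum_filter_eq (row : List Char) (t v : Int) :
    ((PySem.List.enumerate row t).filter (fun cc => decide (cc.1 = v))).map (·.2)
      = if t ≤ v ∧ v < t + row.length then [PySem.List.pyGetD row (v - t) ' '] else [] := by
  induction row generalizing t with
  | nil =>
    simp only [PySem.List.enumerate_nil, List.filter_nil, List.map_nil, List.length_nil,
      Nat.cast_zero, add_zero]
    rw [if_neg (by omega)]
  | cons x xs ih =>
    rw [PySem.List.enumerate_cons]
    by_cases hv : t = v
    · rw [List.filter_cons_of_pos (by simpa using hv)]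
      have hrest : (PySem.List.enumerate xs (t + 1)).filter
          (fun cc => decide (cc.1 = v)) = [] := by
        rw [List.filter_eq_nil_iff]
        intro cc hcc
        rw [PySem.List.mem_enumerate_iff] at hcc
        obtain ⟨j, hj, rfl⟩ := hcc
        simp only [decide_eq_true_eq]
        omega
      rw [hrest]
      rw [if_pos (by push_cast [List.length_cons]; omega)]
      have hvt : v - t = 0 := by omega
      rw [hvt, PySem.List.pyGetD_zero_cons]
      rfl
    · rw [List.filter_cons_of_neg (by simpa using hv), ih (t + 1)]
      by_cases hc : t + 1 ≤ v ∧ v < t + 1 + (xs.length : Int)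
      · rw [if_pos hc, if_pos (by push_cast [List.length_cons] at hc ⊢; omega)]
        have e3 : v - (t + 1) = v - t - 1 := by ring
        rw [e3]
        have e0 : 0 ≤ v - t - 1 := by omega
        have e1 : v - t - 1 < (xs.length : Int) := by omega
        rw [PySem.List.pyGetD_eq_getElem xs ' ' e0 e1,
          PySem.List.pyGetD_eq_getElem (x :: xs) ' ' (by omega : (0:Int) ≤ v - t)
            (by push_cast [List.length_cons]; omega)]
        have e2 : (v - t).toNat = (v - t - 1).toNat + 1 := by omega
        simp only [e2, List.getElem_cons_succ]
      · rw [if_neg hc, if_neg (by push_cast [List.length_cons] at hc ⊢; omega)]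

-- the flat row-major cell list B effectively folds over
def psOf (g : List (List Char)) : List (Int × Char) :=
  (PySem.List.enumerate g).flatMap (fun rr =>
    (PySem.List.enumerate rr.2).map (fun cc => (rr.1 + cc.1, cc.2)))

theorem psOf_filter_aux (g : List (List Char)) (C s k : Nat) :
    (∀ row ∈ g, row.length = C) →
    (((PySem.List.enumerate g (s : Int)).flatMap (fun rr =>
        (PySem.List.enumerate rr.2).map (fun cc => (rr.1 + cc.1, cc.2)))).filter
      (fun p => decide (p.1 = (k : Int)))).map (·.2)
    = (List.range g.length).flatMap (fun r =>
        if s + r ≤ k ∧ k < s + r + C then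
          [PySem.List.pyGetD (g.getD r []) ((k : Int) - ((s + r : Nat) : Int)) ' ']
        else []) := by
  induction g generalizing s with
  | nil => intro _; simp [PySem.List.enumerate_nil]
  | cons row rest ih =>
    intro hrows
    have hrow : row.length = C := hrows row List.mem_cons_self
    rw [PySem.List.enumerate_cons, List.flatMap_cons, List.filter_append, List.map_append]
    have hs1 : ((s : Int) + 1) = ((s + 1 : Nat) : Int) := by push_cast; ring
    rw [hs1, ih (s + 1) (fun r hr => hrows r (List.mem_cons_of_mem _ hr))]
    rw [List.filter_map, List.map_map]
    have hcomp : ((fun (x : Int × Char) => x.2) ∘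
        (fun cc : Int × Char => ((s : Int) + cc.1, cc.2))) = (fun (x : Int × Char) => x.2) := rfl
    rw [hcomp]
    have hpred : ∀ cc ∈ PySem.List.enumerate row,
        ((fun p : Int × Char => decide (p.1 = (k : Int))) ∘
          (fun cc : Int × Char => ((s : Int) + cc.1, cc.2))) cc
          = (fun cc : Int × Char => decide (cc.1 = (k : Int) - (s : Int))) cc := by
      intro cc _
      simp only [Function.comp_apply, decide_eq_decide]
      omega
    rw [List.filter_congr hpred, enum_filter_eq row 0 ((k : Int) - (s : Int))]
    rw [List.length_cons, List.range_succ_eq_map, List.flatMap_cons, List.flatMap_map]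
    congr 1
    · have hv : (k : Int) - (s : Int) - 0 = (k : Int) - ((s + 0 : Nat) : Int) := by
        push_cast; ring
      by_cases hcond : s ≤ k ∧ k < s + C
      · rw [if_pos (by push_cast [hrow]; omega), if_pos (by omega), List.getD_cons_zero, hv]
      · rw [if_neg (by push_cast [hrow]; omega), if_neg (by omega)]
    · have hfun : (fun r => if s + 1 + r ≤ k ∧ k < s + 1 + r + C then
            [PySem.List.pyGetD (rest.getD r []) ((k : Int) - ((s + 1 + r : Nat) : Int)) ' ']
          else [])
          = ((fun r => if s + r ≤ k ∧ k < s + r + C then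
            [PySem.List.pyGetD ((row :: rest).getD r []) ((k : Int) - ((s + r : Nat) : Int)) ' ']
          else []) ∘ Nat.succ) := by
        funext r
        simp only [Function.comp_apply, List.getD_cons_succ]
        refine if_congr (by omega) ?_ rfl
        congr 2
        omega
      rw [hfun]
      rfl

theorem psOf_filter (g : List (List Char)) (C : Nat)
    (hrows : ∀ row ∈ g, row.length = C) (k : Nat) :
    ((psOf g).filter (fun p => decide (p.1 = (k : Int)))).map (·.2) = bucketD g C k := by
  have h := psOf_filter_aux g C 0 k hrows
  simp only [Nat.cast_zero, zero_add] at h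
  rw [psOf, h]
  rfl

theorem psOf_thin_aux (g : List (List Char)) (s k : Nat) :
    (∀ row ∈ g, row.length ≤ 1) →
    (((PySem.List.enumerate g (s : Int)).flatMap (fun rr =>
        (PySem.List.enumerate rr.2).map (fun cc => (rr.1 + cc.1, cc.2)))).filter
      (fun p => decide (p.1 = (k : Int)))).map (·.2)
    = (if s ≤ k ∧ k < s + g.length then g.getD (k - s) [] else []) := by
  induction g generalizing s with
  | nil =>
    intro _
    rw [if_neg (by simp only [List.length_nil, Nat.add_zero]; omega)]
    simp [PySem.List.enumerate_nil]
  | cons row rest ih =>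
    intro hle
    have hrow : row.length ≤ 1 := hle row List.mem_cons_self
    rw [PySem.List.enumerate_cons, List.flatMap_cons, List.filter_append, List.map_append]
    have hs1 : ((s : Int) + 1) = ((s + 1 : Nat) : Int) := by push_cast; ring
    rw [hs1, ih (s + 1) (fun r hr => hle r (List.mem_cons_of_mem _ hr))]
    rw [List.filter_map, List.map_map]
    have hcomp : ((fun (x : Int × Char) => x.2) ∘
        (fun cc : Int × Char => ((s : Int) + cc.1, cc.2))) = (fun (x : Int × Char) => x.2) := rfl
    rw [hcomp]
    have hpred : ∀ cc ∈ PySem.List.enumerate row,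
        ((fun p : Int × Char => decide (p.1 = (k : Int))) ∘
          (fun cc : Int × Char => ((s : Int) + cc.1, cc.2))) cc
          = (fun cc : Int × Char => decide (cc.1 = (k : Int) - (s : Int))) cc := by
      intro cc _
      simp only [Function.comp_apply, decide_eq_decide]
      omega
    rw [List.filter_congr hpred, enum_filter_eq row 0 ((k : Int) - (s : Int))]
    by_cases hk : k = s
    · subst hk
      have hrest : (if k + 1 ≤ k ∧ k < k + 1 + rest.length then rest.getD (k - (k + 1)) [] else [])
          = [] := by
        rw [if_neg (by omega)]
      rw [hrest, List.append_nil,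
        if_pos (by simp only [List.length_cons]; omega : k ≤ k ∧ k < k + (row :: rest).length)]
      cases row with
      | nil =>
        rw [if_neg (by simp), Nat.sub_self, List.getD_cons_zero]
      | cons c cs =>
        have hcs : cs = [] := by
          cases cs with
          | nil => rfl
          | cons d ds => simp at hrow
        subst hcs
        rw [if_pos (by norm_num), Nat.sub_self, List.getD_cons_zero]
        have h0 : (k : Int) - (k : Int) - 0 = 0 := by ring
        rw [h0, PySem.List.pyGetD_zero_cons]
    · have hrowif : (if 0 ≤ (k : Int) - (s : Int) ∧ (k : Int) - (s : Int) < 0 + (row.length : Int)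
          then [PySem.List.pyGetD row ((k : Int) - (s : Int) - 0) ' '] else []) = [] := by
        rw [if_neg (by omega)]
      rw [hrowif, List.nil_append]
      by_cases hc : s + 1 ≤ k ∧ k < s + 1 + rest.length
      · rw [if_pos hc, if_pos (by simp [List.length_cons]; omega)]
        have he : k - s = (k - (s + 1)) + 1 := by omega
        rw [he, List.getD_cons_succ]
      · rw [if_neg hc, if_neg (by simp [List.length_cons]; omega)]

theorem psOf_bounds (g : List (List Char)) (C : Nat)
    (hrows : ∀ row ∈ g, row.length ≤ C) :
    ∀ p ∈ psOf g, 0 ≤ p.1 ∧ p.1 ≤ (g.length : Int) + (C : Int) - 2 := by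
  intro p hp
  rw [psOf, List.mem_flatMap] at hp
  obtain ⟨rr, hrr, hp2⟩ := hp
  rw [List.mem_map] at hp2
  obtain ⟨cc, hcc, rfl⟩ := hp2
  rw [PySem.List.mem_enumerate_iff] at hrr
  obtain ⟨a, ha, rfl⟩ := hrr
  rw [PySem.List.mem_enumerate_iff] at hcc
  obtain ⟨b, hb, rfl⟩ := hcc
  have hC : g[a].length ≤ C := hrows _ (List.getElem_mem ha)
  have hbC : b < C := lt_of_lt_of_le hb hC
  refine ⟨by push_cast; omega, by push_cast; omega⟩

theorem bucket_foldl_length (ps : List (Int × Char)) (acc : List (List Char)) :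
    (ps.foldl stepB acc).length = acc.length := by
  induction ps generalizing acc with
  | nil => rfl
  | cons p ps ih => rw [List.foldl_cons, ih]; simp [stepB, PySem.List.length_pySetD]

theorem bucket_foldl_getD (ps : List (Int × Char)) (acc : List (List Char))
    (h : ∀ p ∈ ps, 0 ≤ p.1 ∧ p.1 < (acc.length : Int)) (k : Nat) :
    (ps.foldl stepB acc).getD k [] =
      acc.getD k [] ++ ((ps.filter (fun p => decide (p.1 = (k : Int)))).map (·.2)) := by
  induction ps generalizing acc with
  | nil => simp
  | cons p ps ih =>
    obtain ⟨h0, h1⟩ := h p List.mem_cons_self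
    have hlen : (stepB acc p).length = acc.length := by
      simp [stepB, PySem.List.length_pySetD]
    rw [List.foldl_cons, ih (stepB acc p)
      (by intro q hq; rw [hlen]; exact h q (List.mem_cons_of_mem _ hq))]
    have hset : stepB acc p
        = acc.set p.1.toNat (PySem.List.pyGetD acc p.1 [] ++ [p.2]) := by
      simp only [stepB]
      exact PySem.List.pySetD_of_nonneg acc _ h0
    by_cases hk : p.1 = (k : Int)
    · have hkn : p.1.toNat = k := by omega
      have hklt : k < acc.length := by omega
      have hgd : PySem.List.pyGetD acc p.1 [] = acc.getD k [] := by
        rw [hk]; simp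
      rw [List.filter_cons_of_pos (by simpa using hk), List.map_cons]
      rw [hset, hkn, hgd, List.getD_eq_getElem?_getD,
        List.getElem?_set_self hklt]
      simp [List.getD_eq_getElem?_getD]
    · have hkn : p.1.toNat ≠ k := by omega
      rw [List.filter_cons_of_neg (by simpa using hk)]
      rw [hset, List.getD_eq_getElem?_getD, List.getElem?_set_ne hkn,
        ← List.getD_eq_getElem?_getD]

theorem list_eq_map_range {α : Type} (l : List α) (d : α) :
    l = (List.range l.length).map (fun k => l.getD k d) := by
  apply List.ext_getElem
  · simp
  · intro i h1 h2
    simp [List.getD_eq_getElem?_getD, List.getElem?_eq_getElem h1]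

-- ===== VERDICT (by name: the statement is the Claim_ definition above) =====
theorem right_diagonals_match_spec : Claim_equal_right_diagonals_match := by
  intro m w _ hpre
  obtain ⟨hne, hshape⟩ := hpre
  unfold Spec_right_diagonals_match
  simp only [right_diagonals_match, right_diagonals_match_alt]
  have hgne : m.map String.toList ≠ [] := by simpa using hne
  rcases hshape with hrect | ⟨hle, hdisj⟩
  have hrows : ∀ row ∈ m.map String.toList, row.length = (m.headD "").toList.length := by
    intro row hrow
    rw [List.mem_map] at hrow
    obtain ⟨t, ht, rfl⟩ := hrow
    exact hrect t ht
  generalize hG : m.map String.toList = g at hrows hgne ⊢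
  generalize hCdef : (m.headD "").toList.length = C at hrows
  have hR : 1 ≤ g.length := List.length_pos_of_ne_nil hgne
  have hmem0 : g.getD 0 [] ∈ g := by
    cases g with
    | nil => exact absurd rfl hgne
    | cons a t => rw [List.getD_cons_zero]; exact List.mem_cons_self
  have hrow0 : (PySem.List.pyGetD g 0 []).length = C := by
    rw [PySem.List.pyGetD_zero]; exact hrows _ hmem0
  simp only [PySem.List.len_eq, hrow0]
  -- B: the double enumerate fold is the fold of stepB over the flat cell list psOf g
  have hfun : (fun (acc : List (List Char)) (rr : Int × List Char) =>
        ((PySem.List.enumerate rr.2).map (fun cc => (rr.1 + cc.1, cc.2))).foldl stepB acc)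
      = (fun acc rr => (PySem.List.enumerate rr.2).foldl (fun acc cc =>
          PySem.List.pySetD acc (rr.1 + cc.1)
            (PySem.List.pyGetD acc (rr.1 + cc.1) [] ++ [cc.2])) acc) := by
    funext acc rr
    rw [List.foldl_map]
    rfl
  have hBfold : ∀ S0 : List (List Char),
      (PySem.List.enumerate g).foldl (fun acc rr => (PySem.List.enumerate rr.2).foldl
        (fun acc cc => PySem.List.pySetD acc (rr.1 + cc.1)
          (PySem.List.pyGetD acc (rr.1 + cc.1) [] ++ [cc.2])) acc) S0
      = (psOf g).foldl stepB S0 := by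
    intro S0
    rw [psOf, List.foldl_flatMap, ← hfun]
  rw [hBfold]
  -- the preallocated accumulator
  have hrep : PySem.List.pyRepeat [([] : List Char)] ((g.length : Int) + (C : Int) - 1)
      = List.replicate (g.length + C - 1) ([] : List Char) := by
    rw [PySem.List.pyRepeat_singleton]
    congr 1
    omega
  rw [hrep]
  set S0 : List (List Char) := List.replicate (g.length + C - 1) [] with hS0
  have hbnd : ∀ p ∈ psOf g, 0 ≤ p.1 ∧ p.1 < (S0.length : Int) := by
    intro p hp
    have := psOf_bounds g C (fun row h => (hrows row h).le) p hp
    rw [hS0, List.length_replicate]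
    constructor
    · exact this.1
    · omega
  set S : List (List Char) := (psOf g).foldl stepB S0 with hS
  have hSlen : S.length = g.length + C - 1 := by
    rw [hS, bucket_foldl_length, hS0, List.length_replicate]
  have hSk : ∀ kk : Nat, S.getD kk [] = bucketD g C kk := by
    intro kk
    rw [hS, bucket_foldl_getD (psOf g) S0 hbnd kk]
    have h0 : S0.getD kk [] = [] := by
      rw [hS0, List.getD_eq_getElem?_getD, List.getElem?_replicate]
      split_ifs <;> rfl
    rw [h0, List.nil_append]
    exact psOf_filter g C hrows kk
  -- turn all three loops into sums
  rw [PySem.List.foldl_add, PySem.List.foldl_add, PySem.List.foldl_add]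
  -- B sum: over the buckets
  have hSexp : S = (List.range (g.length + C - 1)).map (fun kk => bucketD g C kk) := by
    rw [list_eq_map_range S []]
    rw [hSlen]
    exact List.map_congr_left (fun kk _ => hSk kk)
  rw [hSexp, List.map_map]
  -- A first loop: countdown over the top-row diagonals
  rw [PySem.List.pyRange_neg_one_eq_reverse, List.map_reverse, List.sum_reverse]
  have e1 : ((-1 : Int) + 1) = 0 := by norm_num
  have e2 : ((C : Int) - 1 + 1) = (C : Int) := by ring
  rw [e1, e2, PySem.List.pyRange_one, List.map_map]
  -- A second loop
  rw [PySem.List.pyRange_one, List.map_map]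
  -- split B's bucket range
  have hsplit : g.length + C - 1 = C + (g.length - 1) := by omega
  rw [hsplit, List.range_add, List.map_append, List.sum_append, List.map_map]
  have hCnat : ((C : Int) - 0).toNat = C := by omega
  have hRnat : ((g.length : Int) - 1).toNat = g.length - 1 := by omega
  rw [hCnat, hRnat]
  have hfirst : ∀ kk ∈ List.range C,
      ((fun c => count_matches (walkA g 0 c []) w.toList) ∘ (fun kk : Nat => 0 + (kk : Int))) kk
        = ((fun s => count_matches s w.toList) ∘ (fun kk => bucketD g C kk)) kk := by
    intro kk hkk
    rw [List.mem_range] at hkk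
    simp only [Function.comp_apply, zero_add]
    rw [bucketD_eq_walk_first g C kk hkk]
  have hsecond : ∀ j ∈ List.range (g.length - 1),
      ((fun r => count_matches (walkA g r (((PySem.List.pyGetD g r []).length : Int) - 1) [])
          w.toList) ∘ (fun j : Nat => 1 + (j : Int))) j
        = ((fun s => count_matches s w.toList) ∘ ((fun kk => bucketD g C kk) ∘
            (fun x : Nat => C + x))) j := by
    intro j hj
    rw [List.mem_range] at hj
    simp only [Function.comp_apply]
    have ej : (1 : Int) + (j : Int) = ((j + 1 : Nat) : Int) := by push_cast; ring
    rw [ej, PySem.List.pyGetD_natCast]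
    have hjl : j + 1 < g.length := by omega
    have hmemr : g.getD (j + 1) [] ∈ g := by
      have heq : g.getD (j + 1) [] = g[j + 1] := by
        rw [List.getD_eq_getElem?_getD, List.getElem?_eq_getElem hjl]
        rfl
      rw [heq]
      exact List.getElem_mem hjl
    have hlenr : (g.getD (j + 1) []).length = C := hrows _ hmemr
    rw [hlenr, ← bucketD_eq_walk_second g C (j + 1) (Nat.succ_pos j)]
    have hk : (j + 1) + C - 1 = C + j := by omega
    rw [hk]
  rw [List.map_congr_left hfirst, List.map_congr_left hsecond]
  simp only [Function.comp_def]
  omega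
  -- ===== thin branch: every row at most one character =====
  have hle' : ∀ row ∈ m.map String.toList, row.length ≤ 1 := by
    intro row hrow
    rw [List.mem_map] at hrow
    obtain ⟨t, ht, rfl⟩ := hrow
    exact hle t ht
  have hlasteq : ((m.map String.toList).getLastD []).length = (m.getLastD "").toList.length := by
    rw [List.getLastD_eq_getLast?, List.getLastD_eq_getLast?, List.getLast?_map]
    cases hm : m.getLast? with
    | none => simp
    | some x => simp
  have hone' : ((m.map String.toList).getD 0 []).length = 1 ∨
      ((m.map String.toList).getLastD []).length = 0 := by
    rcases hdisj with h1 | h0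
    · left
      cases m with
      | nil => exact absurd rfl hne
      | cons a t => simpa using h1
    · right
      rw [hlasteq]
      exact h0
  generalize hG : m.map String.toList = g at hle' hone' hgne ⊢
  have hR : 1 ≤ g.length := List.length_pos_of_ne_nil hgne
  have hmem0 : g.getD 0 [] ∈ g := by
    cases g with
    | nil => exact absurd rfl hgne
    | cons a t => rw [List.getD_cons_zero]; exact List.mem_cons_self
  have hL0le : (g.getD 0 []).length ≤ 1 := hle' _ hmem0
  have hfun : (fun (acc : List (List Char)) (rr : Int × List Char) =>
        ((PySem.List.enumerate rr.2).map (fun cc => (rr.1 + cc.1, cc.2))).foldl stepB acc)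
      = (fun acc rr => (PySem.List.enumerate rr.2).foldl (fun acc cc =>
          PySem.List.pySetD acc (rr.1 + cc.1)
            (PySem.List.pyGetD acc (rr.1 + cc.1) [] ++ [cc.2])) acc) := by
    funext acc rr
    rw [List.foldl_map]
    rfl
  have hBfold : ∀ S0 : List (List Char),
      (PySem.List.enumerate g).foldl (fun acc rr => (PySem.List.enumerate rr.2).foldl
        (fun acc cc => PySem.List.pySetD acc (rr.1 + cc.1)
          (PySem.List.pyGetD acc (rr.1 + cc.1) [] ++ [cc.2])) acc) S0
      = (psOf g).foldl stepB S0 := by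
    intro S0
    rw [psOf, List.foldl_flatMap, ← hfun]
  -- each walk of A returns its single-cell (or empty) row
  have hwalk : ∀ rn : Nat, rn < g.length →
      walkA g (rn : Int) (((g.getD rn []).length : Int) - 1) [] = g.getD rn [] := by
    intro rn hrn
    have hmemr : g.getD rn [] ∈ g := by
      have heq : g.getD rn [] = g[rn] := by
        rw [List.getD_eq_getElem?_getD, List.getElem?_eq_getElem hrn]
        rfl
      rw [heq]
      exact List.getElem_mem hrn
    have hrlen : (g.getD rn []).length ≤ 1 := hle' _ hmemr
    rw [walkA_closed, List.nil_append]
    have he : (((g.getD rn []).length : Int) - 1 + 1) = ((g.getD rn []).length : Int) := by ring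
    rw [he]
    rcases Nat.le_one_iff_eq_zero_or_eq_one.mp hrlen with hL | hL
    · have hnil : g.getD rn [] = [] := List.eq_nil_of_length_eq_zero hL
      rw [hnil]
      simp
    · obtain ⟨c, hc⟩ := List.length_eq_one_iff.mp hL
      rw [hc]
      have hmin : min (((g.length : Int) - (rn : Int)).toNat)
          ((([c] : List Char).length : Int)).toNat = 1 := by
        simp only [List.length_cons, List.length_nil]
        omega
      rw [hmin, List.range_one, List.map_cons, List.map_nil]
      have hcell : PySem.List.pyGetD (PySem.List.pyGetD g ((rn : Int) + ((0 : Nat) : Int)) [])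
          ((([c] : List Char).length : Int) - 1 - ((0 : Nat) : Int)) ' ' = c := by
        have ha : ((rn : Int) + ((0 : Nat) : Int)) = ((rn : Nat) : Int) := by push_cast; ring
        have hb : ((([c] : List Char).length : Int) - 1 - ((0 : Nat) : Int)) = 0 := by
          simp
        rw [ha, hb, PySem.List.pyGetD_natCast, hc, PySem.List.pyGetD_zero_cons]
      rw [hcell]
  rcases (by omega : (g.getD 0 []).length = 1 ∨ (g.getD 0 []).length = 0) with hL0 | hL0
  -- ===== thin subcase: first row has exactly one character; buckets = all rows =====
  have hrow0 : (PySem.List.pyGetD g 0 []).length = 1 := by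
    rw [PySem.List.pyGetD_zero]; exact hL0
  simp only [PySem.List.len_eq, hrow0, Nat.cast_one]
  rw [hBfold]
  have hrep : PySem.List.pyRepeat [([] : List Char)] ((g.length : Int) + 1 - 1)
      = List.replicate g.length ([] : List Char) := by
    rw [PySem.List.pyRepeat_singleton]
    congr 1
    omega
  rw [hrep]
  set S0 : List (List Char) := List.replicate g.length [] with hS0
  have hbnd : ∀ p ∈ psOf g, 0 ≤ p.1 ∧ p.1 < (S0.length : Int) := by
    intro p hp
    have := psOf_bounds g 1 hle' p hp
    rw [hS0, List.length_replicate]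
    exact ⟨this.1, by omega⟩
  set S : List (List Char) := (psOf g).foldl stepB S0 with hS
  have hSlen : S.length = g.length := by
    rw [hS, bucket_foldl_length, hS0, List.length_replicate]
  have hSk : ∀ kk : Nat, kk < g.length → S.getD kk [] = g.getD kk [] := by
    intro kk hkk
    rw [hS, bucket_foldl_getD (psOf g) S0 hbnd kk]
    have h0 : S0.getD kk [] = [] := by
      rw [hS0, List.getD_eq_getElem?_getD, List.getElem?_replicate]
      split_ifs <;> rfl
    rw [h0, List.nil_append]
    have h := psOf_thin_aux g 0 kk hle'
    simp only [Nat.cast_zero, zero_add, Nat.sub_zero, Nat.zero_le, true_and] at h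
    rw [psOf, h, if_pos hkk]
  have hSexp : S = g := by
    have h1 := list_eq_map_range S []
    rw [hSlen] at h1
    rw [h1]
    conv_rhs => rw [list_eq_map_range g []]
    exact List.map_congr_left (fun kk hkk => hSk kk (List.mem_range.mp hkk))
  rw [hSexp]
  rw [PySem.List.foldl_add, PySem.List.foldl_add, PySem.List.foldl_add]
  have hz : ((1 : Int) - 1) = 0 := by norm_num
  rw [hz]
  have hr01 : PySem.List.pyRange 0 (-1) (-1) = [0] := by
    rw [PySem.List.pyRange_neg_one_cons (by norm_num),
      PySem.List.pyRange_neg_one_eq_nil (by norm_num)]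
  rw [hr01]
  have hw0 : walkA g 0 0 [] = g.getD 0 [] := by
    have h := hwalk 0 (by omega)
    rw [PySem.List.pyGetD_zero] at hrow0
    rw [hrow0] at h
    simpa using h
  rw [PySem.List.pyRange_one, List.map_map]
  have hsecond : ∀ j ∈ List.range (((g.length : Int) - 1)).toNat,
      ((fun r => count_matches (walkA g r (((PySem.List.pyGetD g r []).length : Int) - 1) [])
          w.toList) ∘ (fun j : Nat => 1 + (j : Int))) j
        = (fun j : Nat => count_matches (g.getD (j + 1) []) w.toList) j := by
    intro j hj
    rw [List.mem_range] at hj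
    simp only [Function.comp_apply]
    have ej : (1 : Int) + (j : Int) = ((j + 1 : Nat) : Int) := by push_cast; ring
    rw [ej, PySem.List.pyGetD_natCast]
    rw [hwalk (j + 1) (by omega)]
  rw [List.map_congr_left hsecond]
  simp only [List.map_cons, List.map_nil, List.sum_cons, List.sum_nil, add_zero]
  rw [hw0]
  obtain ⟨a, t, rfl⟩ : ∃ a t, g = a :: t := by
    cases g with
    | nil => exact absurd rfl hgne
    | cons a t => exact ⟨a, t, rfl⟩
  simp only [List.getD_cons_zero, List.map_cons, List.sum_cons, List.getD_cons_succ]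
  have htl : (((a :: t).length : Int) - 1).toNat = t.length := by
    simp only [List.length_cons]
    omega
  rw [htl]
  have htmap : t.map (fun s => count_matches s w.toList)
      = (List.range t.length).map (fun j => count_matches (t.getD j []) w.toList) := by
    conv_lhs => rw [list_eq_map_range t []]
    rw [List.map_map]
    rfl
  rw [htmap]
  omega
  -- ===== thin subcase: empty first row; buckets = all rows but the (empty) last =====
  have hlastnil : (g.getLastD []).length = 0 := hone'.resolve_left (by omega)
  have hrow0 : (PySem.List.pyGetD g 0 []).length = 0 := by
    rw [PySem.List.pyGetD_zero]; exact hL0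
  simp only [PySem.List.len_eq, hrow0, Nat.cast_zero]
  rw [hBfold]
  have hrep : PySem.List.pyRepeat [([] : List Char)] ((g.length : Int) + 0 - 1)
      = List.replicate (g.length - 1) ([] : List Char) := by
    rw [PySem.List.pyRepeat_singleton]
    congr 1
    omega
  rw [hrep]
  set S0 : List (List Char) := List.replicate (g.length - 1) [] with hS0
  have hlastnil' : g.getD (g.length - 1) [] = [] := by
    have h1 : g.getD (g.length - 1) [] = g.getLast hgne := by
      rw [List.getD_eq_getElem?_getD,
        List.getElem?_eq_getElem (by omega : g.length - 1 < g.length),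
        List.getLast_eq_getElem]
      rfl
    have h2 : g.getLastD [] = g.getLast hgne := by
      rw [List.getLastD_eq_getLast?, List.getLast?_eq_some_getLast hgne]
      rfl
    rw [h1, ← h2]
    exact List.eq_nil_of_length_eq_zero hlastnil
  have hbnd : ∀ p ∈ psOf g, 0 ≤ p.1 ∧ p.1 < (S0.length : Int) := by
    intro p hp
    rw [hS0, List.length_replicate]
    rw [psOf, List.mem_flatMap] at hp
    obtain ⟨rr, hrr, hp2⟩ := hp
    rw [List.mem_map] at hp2
    obtain ⟨cc, hcc, rfl⟩ := hp2
    rw [PySem.List.mem_enumerate_iff] at hrr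
    obtain ⟨av, ha, rfl⟩ := hrr
    rw [PySem.List.mem_enumerate_iff] at hcc
    obtain ⟨bv, hb, rfl⟩ := hcc
    have hCa : g[av].length ≤ 1 := hle' _ (List.getElem_mem ha)
    have hanotlast : av ≠ g.length - 1 := by
      intro heq
      have hg : g[av] = g.getD (g.length - 1) [] := by
        rw [List.getD_eq_getElem?_getD,
          List.getElem?_eq_getElem (by omega : g.length - 1 < g.length)]
        subst heq
        rfl
      rw [hg, hlastnil'] at hb
      simp at hb
    have hb' : bv < g[av].length := hb
    refine ⟨by simp; omega, by simp; omega⟩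
  set S : List (List Char) := (psOf g).foldl stepB S0 with hS
  have hSlen : S.length = g.length - 1 := by
    rw [hS, bucket_foldl_length, hS0, List.length_replicate]
  have hSk : ∀ kk : Nat, kk < g.length - 1 → S.getD kk [] = g.getD kk [] := by
    intro kk hkk
    rw [hS, bucket_foldl_getD (psOf g) S0 hbnd kk]
    have h0 : S0.getD kk [] = [] := by
      rw [hS0, List.getD_eq_getElem?_getD, List.getElem?_replicate]
      split_ifs <;> rfl
    rw [h0, List.nil_append]
    have h := psOf_thin_aux g 0 kk hle'
    simp only [Nat.cast_zero, zero_add, Nat.sub_zero, Nat.zero_le, true_and] at h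
    rw [psOf, h, if_pos (by omega : kk < g.length)]
  have hSexp : S = (List.range (g.length - 1)).map (fun kk => g.getD kk []) := by
    have h1 := list_eq_map_range S []
    rw [hSlen] at h1
    rw [h1]
    exact List.map_congr_left (fun kk hkk => hSk kk (List.mem_range.mp hkk))
  rw [hSexp]
  rw [PySem.List.foldl_add, PySem.List.foldl_add, PySem.List.foldl_add]
  have hz : ((0 : Int) - 1) = -1 := by norm_num
  rw [hz, PySem.List.pyRange_neg_one_eq_nil (by norm_num)]
  rw [PySem.List.pyRange_one, List.map_map]
  have hsecond : ∀ j ∈ List.range (((g.length : Int) - 1)).toNat,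
      ((fun r => count_matches (walkA g r (((PySem.List.pyGetD g r []).length : Int) - 1) [])
          w.toList) ∘ (fun j : Nat => 1 + (j : Int))) j
        = (fun j : Nat => count_matches (g.getD (j + 1) []) w.toList) j := by
    intro j hj
    rw [List.mem_range] at hj
    simp only [Function.comp_apply]
    have ej : (1 : Int) + (j : Int) = ((j + 1 : Nat) : Int) := by push_cast; ring
    rw [ej, PySem.List.pyGetD_natCast]
    rw [hwalk (j + 1) (by omega)]
  rw [List.map_congr_left hsecond]
  simp only [List.map_nil, List.sum_nil, List.map_map, Function.comp_def]
  have htl : (((g.length : Int) - 1)).toNat = g.length - 1 := by omega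
  rw [htl]
  have h0nil : g.getD 0 [] = [] := List.eq_nil_of_length_eq_zero hL0
  have hA : ((List.range (g.length - 1)).map
        (fun j => count_matches (g.getD (j + 1) []) w.toList)).sum
      = ((List.range (g.length - 1)).map
        (fun kk => count_matches (g.getD kk []) w.toList)).sum := by
    have hsum1 : ((List.range g.length).map
          (fun kk => count_matches (g.getD kk []) w.toList)).sum
        = count_matches (g.getD 0 []) w.toList + ((List.range (g.length - 1)).map
          (fun j => count_matches (g.getD (j + 1) []) w.toList)).sum := by
      conv_lhs => rw [show g.length = 1 + (g.length - 1) from by omega, List.range_add]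
      rw [List.map_append, List.sum_append, List.map_map, List.range_one]
      simp only [List.map_cons, List.map_nil, List.sum_cons, List.sum_nil, add_zero]
      congr 1
      apply congrArg
      apply List.map_congr_left
      intro x _
      simp only [Function.comp_apply]
      have : 1 + x = x + 1 := Nat.add_comm 1 x
      rw [this]
    have hsum2 : ((List.range g.length).map
          (fun kk => count_matches (g.getD kk []) w.toList)).sum
        = ((List.range (g.length - 1)).map
          (fun kk => count_matches (g.getD kk []) w.toList)).sum
          + count_matches (g.getD (g.length - 1) []) w.toList := by
      conv_lhs => rw [show g.length = (g.length - 1) + 1 from by omega, List.range_succ]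
      rw [List.map_append, List.sum_append]
      simp only [List.map_cons, List.map_nil, List.sum_cons, List.sum_nil, add_zero]
    have hF0 : count_matches (g.getD 0 []) w.toList
        = count_matches (g.getD (g.length - 1) []) w.toList := by
      rw [h0nil, hlastnil']
    omega
  rw [hA]
  omega
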